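-- pv_equiv track=rewrite | github.com/Airlectric/A2SV_Competitive_Programming | codeforces/F_Poisoned_Dagger.py | mink
-- ===== SOURCE A (Python) =====
-- def isEnough(n,arr,k,h):
--     damage = 0
--     for i in range(n-1):
--         damage += min(k, arr[i+1] - arr[i])
--     damage += k
--
--     return damage >= h
--
-- def mink(n,h,arr):
--     left = 1
--     right = h
--     res = 0
--
--     while left <= right:
--         mid = left + (right-left) // 2
--
--         if isEnough(n,arr,mid,h):
--             right = mid - 1
--             res = mid
--         else:
--             left = mid + 1
--
--     return res
-- ===== SOURCE B (Python) =====
-- def mink(n, h, arr):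
--     # Piecewise-linear closed form: f(k) = k + sum(min(k, gap)) is non-decreasing;
--     # walk the sorted gaps, solving a ceil-division in each linear segment.
--     if h < 1:
--         return 0
--     gaps = sorted(arr[i + 1] - arr[i] for i in range(n - 1))
--     m = len(gaps)
--     s = 0
--     for i, g in enumerate(gaps):
--         slope = m - i + 1
--         k = -((s - h) // slope)  # ceil((h - s)/slope)
--         if k < 1:
--             k = 1
--         if k <= g:
--             return k if k <= h else 0
--         s += g
--     k = h - s
--     if k < 1:
--         k = 1
--     return k if k <= h else 0
-- ===== Notes on version B (the rewrite author's own statement) =====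
-- stated objective: faster
-- what changed: Replaces the binary search over k (each probe rescanning all gaps) by sorting the consecutive gaps once and walking the piecewise-linear damage function f(k)=k+sum(min(k,gap)), solving each linear segment in closed form with one ceiling division.
import Mathlib
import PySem

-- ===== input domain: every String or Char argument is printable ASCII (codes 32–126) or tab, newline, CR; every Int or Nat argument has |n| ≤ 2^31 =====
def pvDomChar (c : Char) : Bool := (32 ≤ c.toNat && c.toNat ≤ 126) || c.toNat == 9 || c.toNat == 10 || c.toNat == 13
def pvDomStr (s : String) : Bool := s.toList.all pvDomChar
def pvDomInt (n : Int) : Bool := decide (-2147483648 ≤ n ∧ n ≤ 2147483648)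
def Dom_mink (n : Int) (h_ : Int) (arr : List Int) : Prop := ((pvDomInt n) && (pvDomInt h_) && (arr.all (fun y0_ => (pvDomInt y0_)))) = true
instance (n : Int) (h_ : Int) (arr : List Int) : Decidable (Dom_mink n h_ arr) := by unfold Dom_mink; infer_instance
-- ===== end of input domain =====

-- B replaces A's binary search (each probe rescanning all gaps) by one sorted walk over the
-- gaps that solves each linear segment of f(k)=k+sum(min(k,gap)) by a single ceiling division.


-- ===== PORT A =====
def isEnough (n : Int) (arr : List Int) (k : Int) (h : Int) : Bool :=
  let damage := (PySem.List.pyRange 0 (n - 1) 1).foldl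
    (fun damage i => damage + min k (PySem.List.pyGetD arr (i + 1) 0 - PySem.List.pyGetD arr i 0)) 0
  decide (damage + k ≥ h)

def minkLoop (n : Int) (arr : List Int) (h : Int) (left right res : Int) : Int :=
  if hlr : left ≤ right then
    let mid := left + PySem.Int.floordiv (right - left) 2
    if isEnough n arr mid h then minkLoop n arr h left (mid - 1) mid
    else minkLoop n arr h (mid + 1) right res
  else res
termination_by (right + 1 - left).toNat
decreasing_by
  · have hfd : PySem.Int.floordiv (right - left) 2 = (right - left) / 2 :=
      PySem.Int.floordiv_eq_ediv_of_pos (by norm_num)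
    simp only [hfd]; omega
  · have hfd : PySem.Int.floordiv (right - left) 2 = (right - left) / 2 :=
      PySem.Int.floordiv_eq_ediv_of_pos (by norm_num)
    simp only [hfd]; omega

def mink (n : Int) (h_ : Int) (arr : List Int) : Int :=
  minkLoop n arr h_ 1 h_ 0

-- ===== PORT B =====
def gapsOf (n : Int) (arr : List Int) : List Int :=
  (PySem.List.pyRange 0 (n - 1) 1).map
    (fun i => PySem.List.pyGetD arr (i + 1) 0 - PySem.List.pyGetD arr i 0)

def walk (h m : Int) (i s : Int) : List Int → Int
  | [] =>
      let k0 := h - s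
      let k := if k0 < 1 then 1 else k0
      if k ≤ h then k else 0
  | g :: rest =>
      let slope := m - i + 1
      let q := -(PySem.Int.floordiv (s - h) slope)
      let k := if q < 1 then 1 else q
      if k ≤ g then (if k ≤ h then k else 0)
      else walk h m (i + 1) (s + g) rest

def mink_alt (n : Int) (h_ : Int) (arr : List Int) : Int :=
  if h_ < 1 then 0
  else
    let gaps := PySem.List.sorted (gapsOf n arr) (fun x => x) false
    walk h_ (gaps.length : Int) 0 0 gaps

-- ===== PRECONDITION & SPEC =====
-- Pre_ excludes exactly the inputs on which Python A raises IndexError: h >= 1 together with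
-- 1 < n > len(arr) makes isEnough read arr past its end.
def Pre_mink (n : Int) (h_ : Int) (arr : List Int) : Prop :=
  h_ < 1 ∨ n ≤ 1 ∨ n ≤ (arr.length : Int)
instance (n : Int) (h_ : Int) (arr : List Int) : Decidable (Pre_mink n h_ arr) := by
  unfold Pre_mink; infer_instance

def pvWitness_mink : Int × Int × List Int := (3, 5, [1, 3, 7])

def Spec_mink (n : Int) (h_ : Int) (arr : List Int) (out : Int) : Prop := out = mink_alt n h_ arr
instance (n : Int) (h_ : Int) (arr : List Int) (out : Int) : Decidable (Spec_mink n h_ arr out) := by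
  unfold Spec_mink; infer_instance

-- ===== CLAIM (what is proved, stated in full; the proofs are below) =====
def Claim_equal_mink : Prop := ∀ (n : Int) (h_ : Int) (arr : List Int),
  Dom_mink n h_ arr → Pre_mink n h_ arr → Spec_mink n h_ arr (mink n h_ arr)

-- ===== LEMMAS AND PROOFS =====

-- total damage at poison power k, over a list of gaps
def fval (G : List Int) (k : Int) : Int := k + (G.map (fun g => min k g)).sum

lemma exists_max_mem (l : List Int) (hne : l ≠ []) : ∃ m ∈ l, ∀ x ∈ l, x ≤ m := by
  induction l with
  | nil => exact absurd rfl hne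
  | cons a t ih =>
    cases t with
    | nil => exact ⟨a, by simp⟩
    | cons b t' =>
      obtain ⟨m, hm, hmax⟩ := ih (by simp)
      by_cases ham : a ≤ m
      · exact ⟨m, List.mem_cons_of_mem a hm, by
          intro x hx
          rcases List.mem_cons.mp hx with rfl | hx
          · exact ham
          · exact hmax x hx⟩
      · exact ⟨a, List.mem_cons_self, by
          intro x hx
          rcases List.mem_cons.mp hx with rfl | hx
          · exact le_refl x
          · exact le_trans (hmax x hx) (le_of_not_ge ham)⟩

-- "k is the least power ≥ 1 reaching damage h"
def leastSpec (L : List Int) (h k : Int) : Prop :=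
  1 ≤ k ∧ h ≤ fval L k ∧ ∀ j, 1 ≤ j → j < k → fval L j < h

lemma fval_perm {G G' : List Int} (hp : G.Perm G') (k : Int) : fval G k = fval G' k := by
  unfold fval
  rw [List.Perm.sum_eq (hp.map _)]

lemma fval_mono {G : List Int} {k k' : Int} (hkk : k ≤ k') : fval G k ≤ fval G k' := by
  unfold fval
  induction G with
  | nil => simpa using hkk
  | cons g G ih =>
    simp only [List.map_cons, List.sum_cons] at *
    omega

lemma fval_band (done rest : List Int) (k : Int)
    (hd : ∀ d ∈ done, d ≤ k) (hr : ∀ g ∈ rest, k ≤ g) :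
    fval (done ++ rest) k = k + done.sum + k * (rest.length : Int) := by
  unfold fval
  rw [List.map_append, List.sum_append]
  have e1 : done.map (fun g => min k g) = done := by
    rw [List.map_congr_left (g := fun g => g) (fun a ha => min_eq_right (hd a ha))]
    exact List.map_id' done
  have e2 : rest.map (fun g => min k g) = rest.map (fun _ => k) :=
    List.map_congr_left (fun a ha => min_eq_left (hr a ha))
  rw [e1, e2, PySem.List.sum_map_const_int]
  ring

lemma isEnough_eq (n : Int) (arr : List Int) (k h : Int) :
    isEnough n arr k h = decide (h ≤ fval (gapsOf n arr) k) := by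
  unfold isEnough gapsOf fval
  rw [PySem.List.foldl_add, List.map_map]
  simp only [zero_add, Function.comp_def, ge_iff_le, decide_eq_decide]
  omega

lemma leastSpec_unique {L : List Int} {h k1 k2 : Int}
    (h1 : leastSpec L h k1) (h2 : leastSpec L h k2) : k1 = k2 := by
  obtain ⟨ha1, ha2, ha3⟩ := h1
  obtain ⟨hb1, hb2, hb3⟩ := h2
  rcases lt_trichotomy k1 k2 with hlt | heq | hgt
  · exact absurd ha2 (not_le.mpr (hb3 k1 ha1 hlt))
  · exact heq
  · exact absurd hb2 (not_le.mpr (ha3 k2 hb1 hgt))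

lemma minkLoop_char (n h : Int) (arr : List Int) (L : List Int)
    (heq : ∀ k, isEnough n arr k h = decide (h ≤ fval L k)) :
    ∀ (fuel : Nat) (left right res : Int), (right + 1 - left).toNat = fuel →
    1 ≤ left → right ≤ h →
    (∀ k, 1 ≤ k → k < left → fval L k < h) →
    ((res = 0 ∧ right = h) ∨ (h ≤ fval L res ∧ res = right + 1 ∧ 1 ≤ res ∧ res ≤ h)) →
    (minkLoop n arr h left right res = 0 ∧ ∀ k, 1 ≤ k → k ≤ h → fval L k < h) ∨
    (leastSpec L h (minkLoop n arr h left right res) ∧ minkLoop n arr h left right res ≤ h) := by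
  intro fuel
  induction fuel using Nat.strong_induction_on with
  | _ fuel IH =>
    intro left right res hfuel h1 hrh hA1 hA2
    rw [minkLoop]
    by_cases hlr : left ≤ right
    · rw [dif_pos hlr]
      simp only [heq]
      have hfd : PySem.Int.floordiv (right - left) 2 = (right - left) / 2 :=
        PySem.Int.floordiv_eq_ediv_of_pos (by norm_num)
      set mid := left + PySem.Int.floordiv (right - left) 2 with hmid
      have hmb : left ≤ mid ∧ mid ≤ right := by rw [hmid, hfd]; constructor <;> omega
      by_cases hok : h ≤ fval L mid
      · rw [if_pos (by simpa using hok)]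
        exact IH (mid - 1 + 1 - left).toNat (by omega) left (mid - 1) mid rfl h1 (by omega)
          hA1 (Or.inr ⟨hok, by ring, by omega, by omega⟩)
      · rw [if_neg (by simpa using hok)]
        refine IH (right + 1 - (mid + 1)).toNat (by omega) (mid + 1) right res rfl (by omega)
          hrh ?_ hA2
        intro k hk1 hklt
        by_cases hkl : k < left
        · exact hA1 k hk1 hkl
        · exact lt_of_le_of_lt (fval_mono (by omega)) (not_le.mp hok)
    · rw [dif_neg hlr]
      rcases hA2 with ⟨hres0, hrh'⟩ | ⟨hok, hres, hres1, hresh⟩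
      · left
        exact ⟨hres0, fun k hk1 hkh => hA1 k hk1 (by omega)⟩
      · right
        exact ⟨⟨hres1, hok, fun j hj1 hjlt => hA1 j hj1 (by omega)⟩, hresh⟩

lemma walk_eq (h m : Int) (L : List Int) (hp : L.Pairwise (· ≤ ·))
    (hm : m = (L.length : Int)) (rest : List Int) :
    ∀ (done : List Int) (i s : Int), L = done ++ rest → i = (done.length : Int) →
    s = done.sum →
    (∀ k, 1 ≤ k → (∃ d ∈ done, k ≤ d) → fval L k < h) →
    ∃ k, leastSpec L h k ∧ walk h m i s rest = (if k ≤ h then k else 0) := by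
  induction rest with
  | nil =>
    intro done i s hL hi hs hI3
    have hL' : L = done := by simpa using hL
    subst hL'
    simp only [walk]
    set k : Int := if h - s < 1 then 1 else h - s with hk
    have hk1 : 1 ≤ k := by rw [hk]; split <;> omega
    have hkhs : h - s ≤ k := by rw [hk]; split <;> omega
    have hk2 : 1 < k → k = h - s := by rw [hk]; split <;> omega
    have hband : ∀ k0, (∀ d ∈ L, d ≤ k0) → fval L k0 = k0 + s := by
      intro k0 hd0
      have := fval_band L [] k0 hd0 (by simp)
      simpa [hs] using this
    have hdall : ∀ d ∈ L, d ≤ k := by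
      by_contra hc
      push Not at hc
      obtain ⟨d, hd, hkd⟩ := hc
      obtain ⟨dM, hdM, hmax⟩ := exists_max_mem L (by rintro rfl; simp at hd)
      have hb := hband dM hmax
      have hlt := hI3 dM (by have := hmax d hd; omega) ⟨dM, hdM, le_refl dM⟩
      have := hmax d hd
      omega
    refine ⟨k, ⟨hk1, ?_, ?_⟩, rfl⟩
    · rw [hband k hdall]; omega
    · intro j hj1 hjk
      by_cases hex : ∃ d ∈ L, j ≤ d
      · exact hI3 j hj1 hex
      · push Not at hex
        rw [hband j (fun d hd => le_of_lt (hex d hd))]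
        have := hk2 (by omega)
        omega
  | cons g rest' ih =>
    intro done i s hL hi hs hI3
    simp only [walk]
    set slope := m - i + 1 with hslope
    have hlen : L.length = done.length + rest'.length + 1 := by rw [hL]; simp; omega
    have hslope' : slope = (rest'.length : Int) + 2 := by
      rw [hslope, hm, hi, hlen]; push_cast; ring
    have hspos : (0:Int) < slope := by
      have : (0:Int) ≤ (rest'.length : Int) := Int.natCast_nonneg _
      omega
    set q := -(PySem.Int.floordiv (s - h) slope) with hq
    have hbr : (q - 1) * slope < h - s ∧ h - s ≤ q * slope := by
      have hsh : s - h = -(h - s) := by ring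
      rw [hq, hsh]
      exact (PySem.Int.neg_floordiv_neg_eq_iff_of_pos hspos).mp rfl
    set k : Int := if q < 1 then 1 else q with hk
    have hk1 : 1 ≤ k := by rw [hk]; split <;> omega
    have hkq : q ≤ k := by rw [hk]; split <;> omega
    have hk2 : 1 < k → k = q := by rw [hk]; split <;> omega
    obtain ⟨hpd, hpr, hcross⟩ := List.pairwise_append.mp (hL ▸ hp)
    have hgrest : ∀ r ∈ rest', g ≤ r := (List.pairwise_cons.mp hpr).1
    have hband : ∀ k0, (∀ d ∈ done, d ≤ k0) → k0 ≤ g → fval L k0 = s + k0 * slope := by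
      intro k0 hd0 hkg0
      have hb := fval_band done (g :: rest') k0 hd0 (by
        intro r hr
        rcases List.mem_cons.mp hr with rfl | hr
        · exact hkg0
        · exact le_trans hkg0 (hgrest r hr))
      rw [hL, hb, hslope', hs]
      simp only [List.length_cons]
      push_cast
      ring
    have hdone_le : ∀ k0, g < k0 → ∀ d ∈ done, d ≤ k0 := by
      intro k0 hgk0 d hd
      exact le_trans (hcross d hd g List.mem_cons_self) (le_of_lt hgk0)
    by_cases hkg : k ≤ g
    · rw [if_pos hkg]
      have hdall : ∀ d ∈ done, d ≤ k := by
        by_contra hc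
        push Not at hc
        obtain ⟨d, hd, hkd⟩ := hc
        obtain ⟨dM, hdM, hmax⟩ := exists_max_mem done (by rintro rfl; simp at hd)
        have hdMg : dM ≤ g := hcross dM hdM g List.mem_cons_self
        have hb := hband dM hmax hdMg
        have hlt := hI3 dM (by have := hmax d hd; omega) ⟨dM, hdM, le_refl dM⟩
        have hmul : dM * slope < q * slope := by omega
        have : dM < q := lt_of_mul_lt_mul_right hmul (le_of_lt hspos)
        have := hmax d hd
        omega
      refine ⟨k, ⟨hk1, ?_, ?_⟩, rfl⟩
      · rw [hband k hdall hkg]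
        have : q * slope ≤ k * slope := mul_le_mul_of_nonneg_right hkq (le_of_lt hspos)
        omega
      · intro j hj1 hjk
        by_cases hex : ∃ d ∈ done, j ≤ d
        · exact hI3 j hj1 hex
        · push Not at hex
          rw [hband j (fun d hd => le_of_lt (hex d hd)) (by omega)]
          have hkq' := hk2 (by omega)
          have : j * slope ≤ (q - 1) * slope :=
            mul_le_mul_of_nonneg_right (by omega) (le_of_lt hspos)
          omega
    · rw [if_neg hkg]
      refine ih (done ++ [g]) (i + 1) (s + g) (by rw [hL]; simp) (by push_cast [hi, List.length_append, List.length_cons, List.length_nil]; ring)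
        (by rw [hs]; simp) ?_
      intro k0 hk01 hex
      obtain ⟨d, hd, hk0d⟩ := hex
      rcases List.mem_append.mp hd with hd | hd
      · exact hI3 k0 hk01 ⟨d, hd, hk0d⟩
      · have hdg : d = g := by simpa using hd
        subst hdg
        by_cases hex' : ∃ d' ∈ done, k0 ≤ d'
        · exact hI3 k0 hk01 hex'
        · push Not at hex'
          rw [hband k0 (fun d' hd' => le_of_lt (hex' d' hd')) hk0d]
          have hkq' := hk2 (by omega)
          have : k0 * slope ≤ (q - 1) * slope :=
            mul_le_mul_of_nonneg_right (by omega) (le_of_lt hspos)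
          omega

-- ===== VERDICT (by name: the statement is the Claim_ definition above) =====
theorem mink_spec : Claim_equal_mink := by
  unfold Claim_equal_mink
  intro n h arr _ _
  unfold Spec_mink mink mink_alt
  by_cases hh : h < 1
  · rw [if_pos hh, minkLoop, dif_neg (by omega)]
  · rw [if_neg hh]
    set L := PySem.List.sorted (gapsOf n arr) (fun x => x) false with hLdef
    show minkLoop n arr h 1 h 0 = walk h (L.length : Int) 0 0 L
    have hperm : L.Perm (gapsOf n arr) := PySem.List.sorted_perm _ _ _
    have hp : L.Pairwise (· ≤ ·) := by
      have := PySem.List.sorted_pairwise (gapsOf n arr) (fun x => x)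
      simpa [hLdef] using this
    have heq : ∀ k, isEnough n arr k h = decide (h ≤ fval L k) := by
      intro k
      rw [isEnough_eq, fval_perm hperm]
    have hA := minkLoop_char n h arr L heq (h + 1 - 1).toNat 1 h 0 rfl (le_refl 1)
      (le_refl h) (fun k hk1 hkl => absurd hk1 (by omega)) (Or.inl ⟨rfl, rfl⟩)
    have hB := walk_eq h (L.length : Int) L hp rfl L [] 0 0 (by simp)
      (by simp) (by simp) (by rintro k _ ⟨d, hd, _⟩; simp at hd)
    obtain ⟨k, hls, hwalk⟩ := hB
    rw [hwalk]
    rcases hA with ⟨hz, hnone⟩ | ⟨hls', hle⟩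
    · rw [hz]
      have hnk : ¬ k ≤ h := fun hkh => absurd hls.2.1 (not_le.mpr (hnone k hls.1 hkh))
      rw [if_neg hnk]
    · rw [← leastSpec_unique hls' hls, if_pos hle]
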